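-- pv_equiv track=rewrite | github.com/NGKsSystems/NGKsPlayerNative | tools/analysis/key_same_root_mode_eval.py | classify_key_relation
-- ===== SOURCE A (Python) =====
-- def classify_key_relation(detected_cam: str, gt_cams: list) -> str:
--     if not gt_cams or not detected_cam:
--         return "UNKNOWN"
--     for gt in gt_cams:
--         if detected_cam == gt:
--             return "EXACT"
--     for gt in gt_cams:
--         d_num, d_let = detected_cam[:-1], detected_cam[-1]
--         g_num, g_let = gt[:-1], gt[-1]
--         if d_let == g_let:
--             diff = abs(int(d_num) - int(g_num))
--             if diff == 1 or diff == 11: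
--                 return "NEIGHBOR"
--     for gt in gt_cams:
--         d_num, d_let = detected_cam[:-1], detected_cam[-1]
--         g_num, g_let = gt[:-1], gt[-1]
--         if d_num == g_num and d_let != g_let:
--             return "RELATIVE"
--     return "WRONG"
-- ===== SOURCE B (Python) =====
-- def classify_key_relation(detected_cam: str, gt_cams: list) -> str:
--     if not gt_cams or not detected_cam:
--         return "UNKNOWN"
--     if detected_cam in gt_cams:
--         return "EXACT"
--     d_num, d_let = detected_cam[:-1], detected_cam[-1]
--     relative_found = False
--     for gt in gt_cams:
--         g_num, g_let = gt[:-1], gt[-1]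
--         if d_let == g_let:
--             diff = abs(int(d_num) - int(g_num))
--             if diff == 1 or diff == 11:
--                 return "NEIGHBOR"
--         elif d_num == g_num:
--             relative_found = True
--     return "RELATIVE" if relative_found else "WRONG"
-- ===== Notes on version B (the rewrite author's own statement) =====
-- stated objective: simpler
-- what changed: A's three sequential scans (exact, neighbor, relative) are replaced by a C-level membership test plus ONE pass that slices/parses the detected key once before the loop, returns NEIGHBOR immediately and records RELATIVE in a flag resolved after the loop.
import Mathlib
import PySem

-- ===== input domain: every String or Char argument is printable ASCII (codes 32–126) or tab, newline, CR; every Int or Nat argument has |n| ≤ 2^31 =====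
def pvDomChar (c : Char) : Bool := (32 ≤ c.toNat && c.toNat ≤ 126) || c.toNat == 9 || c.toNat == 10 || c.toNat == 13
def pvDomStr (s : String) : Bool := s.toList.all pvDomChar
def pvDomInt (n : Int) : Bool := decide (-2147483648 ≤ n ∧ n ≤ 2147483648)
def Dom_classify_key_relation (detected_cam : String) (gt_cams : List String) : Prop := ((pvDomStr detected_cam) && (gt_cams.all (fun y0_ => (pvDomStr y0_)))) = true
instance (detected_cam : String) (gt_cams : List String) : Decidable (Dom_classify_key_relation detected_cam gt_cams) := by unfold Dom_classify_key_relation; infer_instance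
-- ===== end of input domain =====

-- B replaces A's three sequential scans by a membership test plus one pass with a RELATIVE flag (simpler decomposition, same results).


-- ===== PORT A =====
-- second loop of A: some true = "return NEIGHBOR", some false = fell through, none = Python raised
def aLoop2 (d : List Char) : List (List Char) → Option Bool
  | [] => some false
  | gt :: rest =>
    match PySem.List.pyGet? d (-1), PySem.List.pyGet? gt (-1) with
    | some d_let, some g_let =>
      if d_let = g_let then
        match PySem.Int.ofChars? (PySem.List.slice d none (some (-1))),
              PySem.Int.ofChars? (PySem.List.slice gt none (some (-1))) with
        | some dn, some gn =>
          if |dn - gn| = 1 ∨ |dn - gn| = 11 then some true else aLoop2 d rest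
        | _, _ => none
      else aLoop2 d rest
    | _, _ => none

-- third loop of A: some true = "return RELATIVE", some false = fell through, none = Python raised
def aLoop3 (d : List Char) : List (List Char) → Option Bool
  | [] => some false
  | gt :: rest =>
    match PySem.List.pyGet? d (-1), PySem.List.pyGet? gt (-1) with
    | some d_let, some g_let =>
      if PySem.List.slice d none (some (-1)) = PySem.List.slice gt none (some (-1)) ∧ d_let ≠ g_let
      then some true else aLoop3 d rest
    | _, _ => none

def classify_key_relation (detected_cam : String) (gt_cams : List String) : String :=
  if gt_cams.isEmpty || detected_cam == "" then "UNKNOWN"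
  else if gt_cams.any (fun gt => detected_cam == gt) then "EXACT"
  else
    let d := detected_cam.toList
    let gts := gt_cams.map String.toList
    match aLoop2 d gts with
    | some true => "NEIGHBOR"
    | some false =>
      match aLoop3 d gts with
      | some true => "RELATIVE"
      | some false => "WRONG"
      | none => "ERROR"   -- unreachable under Pre_ (Python raises here)
    | none => "ERROR"     -- unreachable under Pre_ (Python raises here)

-- ===== PORT B =====
-- B's single pass: some "NEIGHBOR"/"RELATIVE"/"WRONG", none = Python raised
def bLoop (d_num : List Char) (d_let : Char) : List (List Char) → Bool → Option String
  | [], rel => some (if rel then "RELATIVE" else "WRONG")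
  | gt :: rest, rel =>
    match PySem.List.pyGet? gt (-1) with
    | none => none
    | some g_let =>
      let g_num := PySem.List.slice gt none (some (-1))
      if d_let = g_let then
        match PySem.Int.ofChars? d_num, PySem.Int.ofChars? g_num with
        | some dn, some gn =>
          if |dn - gn| = 1 ∨ |dn - gn| = 11 then some "NEIGHBOR" else bLoop d_num d_let rest rel
        | _, _ => none
      else if d_num = g_num then bLoop d_num d_let rest true
      else bLoop d_num d_let rest rel

def classify_key_relation_alt (detected_cam : String) (gt_cams : List String) : String :=
  if gt_cams.isEmpty || detected_cam == "" then "UNKNOWN"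
  else if detected_cam ∈ gt_cams then "EXACT"
  else
    let d := detected_cam.toList
    match PySem.List.pyGet? d (-1) with
    | none => "ERROR"     -- unreachable: detected_cam ≠ ""
    | some d_let =>
      match bLoop (PySem.List.slice d none (some (-1))) d_let (gt_cams.map String.toList) false with
      | some r => r
      | none => "ERROR"   -- unreachable under Pre_ (Python raises here)

-- ===== PRECONDITION & SPEC =====
-- gt is safe to process against d: nonempty, and if its last letter matches d's then both numeric prefixes parse as ints
def okGt (d gt : List Char) : Bool :=
  !gt.isEmpty &&
  (!(PySem.List.pyGet? gt (-1) == PySem.List.pyGet? d (-1)) ||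
    ((PySem.Int.ofChars? (PySem.List.slice d none (some (-1)))).isSome &&
     (PySem.Int.ofChars? (PySem.List.slice gt none (some (-1)))).isSome))

-- gt triggers A's (and B's) NEIGHBOR return against d
def nbGt (d gt : List Char) : Bool :=
  (PySem.List.pyGet? gt (-1) == PySem.List.pyGet? d (-1)) &&
  (match PySem.Int.ofChars? (PySem.List.slice d none (some (-1))),
         PySem.Int.ofChars? (PySem.List.slice gt none (some (-1))) with
   | some dn, some gn => decide (|dn - gn| = 1 ∨ |dn - gn| = 11)
   | _, _ => false)

-- Pre_ admits exactly the inputs where Python A returns (no exception): the guard cases, an exact match,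
-- every entry well-formed, or a NEIGHBOR entry occurring before the first malformed entry (A returns there too).
def Pre_classify_key_relation (detected_cam : String) (gt_cams : List String) : Prop :=
  gt_cams = [] ∨ detected_cam = "" ∨ detected_cam ∈ gt_cams ∨
  (∀ gt ∈ gt_cams, okGt detected_cam.toList gt.toList = true) ∨
  (∃ i, ∃ _ : i < gt_cams.length,
    nbGt detected_cam.toList ((gt_cams[i]'(by omega)).toList) = true ∧
    ∀ j, ∀ _ : j < i, okGt detected_cam.toList ((gt_cams[j]'(by omega)).toList) = true)

instance (detected_cam : String) (gt_cams : List String) : Decidable (Pre_classify_key_relation detected_cam gt_cams) := by unfold Pre_classify_key_relation; infer_instance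

def pvWitness_classify_key_relation : String × List String := ("8A", ["9A", "8B"])

def Spec_classify_key_relation (detected_cam : String) (gt_cams : List String) (out : String) : Prop := out = classify_key_relation_alt detected_cam gt_cams
instance (detected_cam : String) (gt_cams : List String) (out : String) : Decidable (Spec_classify_key_relation detected_cam gt_cams out) := by unfold Spec_classify_key_relation; infer_instance

-- ===== CLAIM (what is proved, stated in full; the proofs are below) =====
def Claim_equal_classify_key_relation : Prop := ∀ (detected_cam : String) (gt_cams : List String), Dom_classify_key_relation detected_cam gt_cams → Pre_classify_key_relation detected_cam gt_cams → Spec_classify_key_relation detected_cam gt_cams (classify_key_relation detected_cam gt_cams)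

-- ===== LEMMAS AND PROOFS =====

-- gt triggers A's RELATIVE return against d (proof-side characterisation)
def relGt (d gt : List Char) : Bool :=
  !(PySem.List.pyGet? gt (-1) == PySem.List.pyGet? d (-1)) &&
  (PySem.List.slice d none (some (-1)) == PySem.List.slice gt none (some (-1)))

theorem pyGet?_neg_one_some {gt : List Char} (h : gt ≠ []) : ∃ c, PySem.List.pyGet? gt (-1) = some c := by
  rw [PySem.List.pyGet?_neg_one]
  exact Option.isSome_iff_exists.mp (List.getLast?_isSome.mpr h)

theorem aLoop2_ok (d : List Char) (dl : Char) (hdl : PySem.List.pyGet? d (-1) = some dl)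
    (gts : List (List Char)) (hok : ∀ gt ∈ gts, okGt d gt = true) :
    aLoop2 d gts = some (gts.any (nbGt d)) := by
  induction gts with
  | nil => simp [aLoop2]
  | cons gt rest ih =>
    have hokh := hok gt (by simp)
    have hne : gt ≠ [] := by
      intro h; rw [h] at hokh; simp [okGt] at hokh
    obtain ⟨gl, hgl⟩ := pyGet?_neg_one_some hne
    by_cases hlet : dl = gl
    · have hmatch : (PySem.List.pyGet? gt (-1) == PySem.List.pyGet? d (-1)) = true := by
        rw [hdl, hgl, hlet]; simp
      have hparse := hokh
      simp only [okGt, hmatch, Bool.not_true, Bool.false_or, Bool.and_eq_true] at hparse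
      obtain ⟨dn, hdn⟩ := Option.isSome_iff_exists.mp hparse.2.1
      obtain ⟨gn, hgn⟩ := Option.isSome_iff_exists.mp hparse.2.2
      by_cases hdiff : |dn - gn| = 1 ∨ |dn - gn| = 11
      · have hnb : nbGt d gt = true := by simp [nbGt, hmatch, hdn, hgn, hdiff]
        simp [aLoop2, hdl, hgl, hlet, hdn, hgn, hdiff, hnb]
      · have hnb : nbGt d gt = false := by simp [nbGt, hdn, hgn, hdiff]
        simp [aLoop2, hdl, hgl, hlet, hdn, hgn, hdiff, hnb, ih (fun g hg => hok g (by simp [hg]))]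
    · have hmatch : (PySem.List.pyGet? gt (-1) == PySem.List.pyGet? d (-1)) = false := by
        rw [hdl, hgl]; simp; intro h; exact hlet h.symm
      have hnb : nbGt d gt = false := by simp [nbGt, hmatch]
      simp [aLoop2, hdl, hgl, if_neg hlet, hnb, ih (fun g hg => hok g (by simp [hg]))]

theorem aLoop3_ok (d : List Char) (dl : Char) (hdl : PySem.List.pyGet? d (-1) = some dl)
    (gts : List (List Char)) (hok : ∀ gt ∈ gts, okGt d gt = true) :
    aLoop3 d gts = some (gts.any (relGt d)) := by
  induction gts with
  | nil => simp [aLoop3]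
  | cons gt rest ih =>
    have hokh := hok gt (by simp)
    have hne : gt ≠ [] := by
      intro h; rw [h] at hokh; simp [okGt] at hokh
    obtain ⟨gl, hgl⟩ := pyGet?_neg_one_some hne
    have ih' := ih (fun g hg => hok g (by simp [hg]))
    by_cases hlet : dl = gl
    · have : relGt d gt = false := by simp [relGt, hdl, hgl, hlet]
      simp [aLoop3, hdl, hgl, hlet, this, ih']
    · have hne' : (PySem.List.pyGet? gt (-1) == PySem.List.pyGet? d (-1)) = false := by
        rw [hdl, hgl]; simp; intro h; exact hlet h.symm
      by_cases hnum : PySem.List.slice d none (some (-1)) = PySem.List.slice gt none (some (-1))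
      · have : relGt d gt = true := by simp [relGt, hne', hnum]
        simp [aLoop3, hdl, hgl, hlet, hnum, this]
      · have : relGt d gt = false := by simp [relGt, hnum]
        simp [aLoop3, hdl, hgl, hlet, hnum, this, ih']

theorem bLoop_ok (d : List Char) (dl : Char) (hdl : PySem.List.pyGet? d (-1) = some dl)
    (gts : List (List Char)) (hok : ∀ gt ∈ gts, okGt d gt = true) (rel : Bool) :
    bLoop (PySem.List.slice d none (some (-1))) dl gts rel =
      some (if gts.any (nbGt d) then "NEIGHBOR"
            else if rel || gts.any (relGt d) then "RELATIVE" else "WRONG") := by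
  induction gts generalizing rel with
  | nil => simp [bLoop]
  | cons gt rest ih =>
    have hokh := hok gt (by simp)
    have hne : gt ≠ [] := by
      intro h; rw [h] at hokh; simp [okGt] at hokh
    obtain ⟨gl, hgl⟩ := pyGet?_neg_one_some hne
    have ih' := ih (fun g hg => hok g (by simp [hg]))
    by_cases hlet : dl = gl
    · have hmatch : (PySem.List.pyGet? gt (-1) == PySem.List.pyGet? d (-1)) = true := by
        rw [hdl, hgl, hlet]; simp
      have hparse := hokh
      simp only [okGt, hmatch, Bool.not_true, Bool.false_or, Bool.and_eq_true] at hparse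
      obtain ⟨dn, hdn⟩ := Option.isSome_iff_exists.mp hparse.2.1
      obtain ⟨gn, hgn⟩ := Option.isSome_iff_exists.mp hparse.2.2
      have hrel : relGt d gt = false := by simp [relGt, hdl, hgl, hlet]
      by_cases hdiff : |dn - gn| = 1 ∨ |dn - gn| = 11
      · have hnb : nbGt d gt = true := by simp [nbGt, hmatch, hdn, hgn, hdiff]
        simp [bLoop, hgl, if_pos hlet, hdn, hgn, hdiff, hnb]
      · have hnb : nbGt d gt = false := by simp [nbGt, hdn, hgn, hdiff]
        simp [bLoop, hgl, if_pos hlet, hdn, hgn, hdiff, hnb, hrel, ih']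
    · have hmatch : (PySem.List.pyGet? gt (-1) == PySem.List.pyGet? d (-1)) = false := by
        rw [hdl, hgl]; simp; intro h; exact hlet h.symm
      have hnb : nbGt d gt = false := by simp [nbGt, hmatch]
      by_cases hnum : PySem.List.slice d none (some (-1)) = PySem.List.slice gt none (some (-1))
      · have hrel : relGt d gt = true := by simp [relGt, hmatch, hnum]
        simp only [bLoop, hgl]
        rw [if_neg hlet, if_pos hnum, ih' true]
        simp [hnb, hrel]
      · have hrel : relGt d gt = false := by simp [relGt, hnum]
        simp only [bLoop, hgl]
        rw [if_neg hlet, if_neg hnum, ih' rel]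
        simp [hnb, hrel]

theorem nbGt_parse (d gt : List Char) (h : nbGt d gt = true) :
    ∃ dn gn, PySem.Int.ofChars? (PySem.List.slice d none (some (-1))) = some dn ∧
      PySem.Int.ofChars? (PySem.List.slice gt none (some (-1))) = some gn ∧
      (|dn - gn| = 1 ∨ |dn - gn| = 11) := by
  simp only [nbGt, Bool.and_eq_true] at h
  obtain ⟨-, h2⟩ := h
  cases hdn : PySem.Int.ofChars? (PySem.List.slice d none (some (-1))) with
  | none => rw [hdn] at h2; simp at h2
  | some dn =>
    cases hgn : PySem.Int.ofChars? (PySem.List.slice gt none (some (-1))) with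
    | none => rw [hdn, hgn] at h2; simp at h2
    | some gn =>
      rw [hdn, hgn] at h2; simp at h2
      exact ⟨dn, gn, rfl, rfl, h2⟩

theorem aLoop2_nb (d : List Char) (dl : Char) (hdl : PySem.List.pyGet? d (-1) = some dl)
    (pre : List (List Char)) (g : List Char) (post : List (List Char))
    (hok : ∀ gt ∈ pre, okGt d gt = true) (hnb : nbGt d g = true) :
    aLoop2 d (pre ++ g :: post) = some true := by
  induction pre with
  | nil =>
    have hgl : PySem.List.pyGet? g (-1) = some dl := by
      have := (Bool.and_eq_true _ _).mp hnb |>.1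
      rw [hdl] at this; simpa using this
    obtain ⟨dn, gn, hdn, hgn, hdiff⟩ := nbGt_parse d g hnb
    simp [aLoop2, hdl, hgl, hdn, hgn, hdiff]
  | cons gt rest ih =>
    have hokh := hok gt (by simp)
    have hne : gt ≠ [] := by
      intro h; rw [h] at hokh; simp [okGt] at hokh
    obtain ⟨gl, hgl⟩ := pyGet?_neg_one_some hne
    have ih' := ih (fun x hx => hok x (by simp [hx]))
    by_cases hlet : dl = gl
    · have hmatch : (PySem.List.pyGet? gt (-1) == PySem.List.pyGet? d (-1)) = true := by
        rw [hdl, hgl, hlet]; simp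
      have hparse := hokh
      simp only [okGt, hmatch, Bool.not_true, Bool.false_or, Bool.and_eq_true] at hparse
      obtain ⟨dn, hdn⟩ := Option.isSome_iff_exists.mp hparse.2.1
      obtain ⟨gn, hgn⟩ := Option.isSome_iff_exists.mp hparse.2.2
      by_cases hdiff : |dn - gn| = 1 ∨ |dn - gn| = 11
      · simp [aLoop2, hdl, hgl, hlet, hdn, hgn, hdiff]
      · simp [aLoop2, hdl, hgl, hlet, hdn, hgn, hdiff, ih']
    · simp [aLoop2, hdl, hgl, hlet, ih']

theorem bLoop_nb (d : List Char) (dl : Char) (hdl : PySem.List.pyGet? d (-1) = some dl)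
    (pre : List (List Char)) (g : List Char) (post : List (List Char))
    (hok : ∀ gt ∈ pre, okGt d gt = true) (hnb : nbGt d g = true) (rel : Bool) :
    bLoop (PySem.List.slice d none (some (-1))) dl (pre ++ g :: post) rel = some "NEIGHBOR" := by
  induction pre generalizing rel with
  | nil =>
    have hgl : PySem.List.pyGet? g (-1) = some dl := by
      have := (Bool.and_eq_true _ _).mp hnb |>.1
      rw [hdl] at this; simpa using this
    obtain ⟨dn, gn, hdn, hgn, hdiff⟩ := nbGt_parse d g hnb
    simp [bLoop, hgl, hdn, hgn, hdiff]
  | cons gt rest ih =>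
    have hokh := hok gt (by simp)
    have hne : gt ≠ [] := by
      intro h; rw [h] at hokh; simp [okGt] at hokh
    obtain ⟨gl, hgl⟩ := pyGet?_neg_one_some hne
    have ih' := fun r => ih (fun x hx => hok x (by simp [hx])) r
    by_cases hlet : dl = gl
    · subst hlet
      have hmatch : (PySem.List.pyGet? gt (-1) == PySem.List.pyGet? d (-1)) = true := by
        rw [hdl, hgl]; simp
      have hparse := hokh
      simp only [okGt, hmatch, Bool.not_true, Bool.false_or, Bool.and_eq_true] at hparse
      obtain ⟨dn, hdn⟩ := Option.isSome_iff_exists.mp hparse.2.1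
      obtain ⟨gn, hgn⟩ := Option.isSome_iff_exists.mp hparse.2.2
      by_cases hdiff : |dn - gn| = 1 ∨ |dn - gn| = 11
      · simp [bLoop, hgl, hdn, hgn, hdiff]
      · simp [bLoop, hgl, hdn, hgn, hdiff, ih']
    · by_cases hnum : PySem.List.slice d none (some (-1)) = PySem.List.slice gt none (some (-1))
      · simp only [List.cons_append, bLoop, hgl]
        rw [if_neg hlet, if_pos hnum, ih' true]
      · simp only [List.cons_append, bLoop, hgl]
        rw [if_neg hlet, if_neg hnum, ih' rel]

-- ===== VERDICT (by name: the statement is the Claim_ definition above) =====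
theorem classify_key_relation_spec : Claim_equal_classify_key_relation := by
  intro dc gts hdom hpre
  unfold Spec_classify_key_relation
  by_cases hemp : gts.isEmpty
  · simp [classify_key_relation, classify_key_relation_alt, hemp]
  by_cases hdc : dc = ""
  · simp [classify_key_relation, classify_key_relation_alt, hdc]
  have hguard : (gts.isEmpty || dc == "") = false := by simp [hemp, hdc]
  by_cases hmem : dc ∈ gts
  · have hany : gts.any (fun gt => dc == gt) = true := by
      simp only [List.any_eq_true, beq_iff_eq]; exact ⟨dc, hmem, rfl⟩
    simp [classify_key_relation, classify_key_relation_alt, hguard, hany, hmem]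
  have hany : gts.any (fun gt => dc == gt) = false := by
    simp only [List.any_eq_false, beq_iff_eq]; intro x hx h; exact hmem (h ▸ hx)
  have hdne : dc.toList ≠ [] := fun h => hdc (String.toList_eq_nil_iff.mp h)
  obtain ⟨dl, hdl⟩ := pyGet?_neg_one_some hdne
  rcases hpre with h | h | h | hok | ⟨i, hi, hnb, hpre'⟩
  · exact absurd (by simp [h] : gts.isEmpty = true) hemp
  · exact absurd h hdc
  · exact absurd h hmem
  · -- every entry well-formed: both sides reduce to the any-characterisations
    have hokm : ∀ g ∈ gts.map String.toList, okGt dc.toList g = true := by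
      intro g hg; obtain ⟨s, hs, rfl⟩ := List.mem_map.mp hg; exact hok s hs
    have hA2 := aLoop2_ok dc.toList dl hdl (gts.map String.toList) hokm
    have hA3 := aLoop3_ok dc.toList dl hdl (gts.map String.toList) hokm
    have hB := bLoop_ok dc.toList dl hdl (gts.map String.toList) hokm false
    simp only [classify_key_relation, classify_key_relation_alt, hguard, hany, hmem,
      Bool.false_eq_true, if_false, hdl, hA2, hA3, hB]
    by_cases h1 : (gts.map String.toList).any (nbGt dc.toList) <;>
      by_cases h2 : (gts.map String.toList).any (relGt dc.toList) <;>
        simp [h1, h2]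
  · -- a NEIGHBOR entry before the first malformed one: both sides return "NEIGHBOR"
    have hsplit : gts = gts.take i ++ gts[i] :: gts.drop (i + 1) := by
      conv_lhs => rw [← List.take_append_drop i gts]
      rw [List.drop_eq_getElem_cons hi]
    have hokpre : ∀ g ∈ (gts.take i).map String.toList, okGt dc.toList g = true := by
      intro g hg; obtain ⟨s, hs, rfl⟩ := List.mem_map.mp hg
      obtain ⟨j, hj, rfl⟩ := List.mem_take_iff_getElem.mp hs
      have hj' : j < i := lt_of_lt_of_le hj (by omega)
      have := hpre' j hj'
      simpa using this
    have hmap : gts.map String.toList =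
        (gts.take i).map String.toList ++ (gts[i]).toList :: (gts.drop (i + 1)).map String.toList := by
      conv_lhs => rw [hsplit]
      rw [List.map_append, List.map_cons]
    have hA := aLoop2_nb dc.toList dl hdl ((gts.take i).map String.toList) (gts[i]).toList
      ((gts.drop (i + 1)).map String.toList) hokpre hnb
    have hB := bLoop_nb dc.toList dl hdl ((gts.take i).map String.toList) (gts[i]).toList
      ((gts.drop (i + 1)).map String.toList) hokpre hnb false
    simp only [classify_key_relation, classify_key_relation_alt, hguard, hany, hmem,
      Bool.false_eq_true, if_false, hdl, hmap, hA, hB]
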